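-- pv_equiv track=rewrite | github.com/Vinay-webDev/1hackerrankjs | 59.py | possibleChanges
-- ===== SOURCE A (Python) =====
-- def possibleChanges(username):
--     res = []
--     for user in username:
--         change = "NO"
--         for i in range(1, len(user)):
--             if user[i - 1] > user[i]:
--                 change = "YES"
--                 break
--         res.append(change)
--     return res
-- ===== SOURCE B (Python) =====
-- def possibleChanges(username):
--     return ["NO" if list(u) == sorted(u) else "YES" for u in username]
-- ===== Notes on version B (the rewrite author's own statement) =====
-- stated objective: simpler
-- what changed: Replaces the explicit adjacent-pair scan with break by a one-line comprehension comparing each string to its sorted character list.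
import Mathlib
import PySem

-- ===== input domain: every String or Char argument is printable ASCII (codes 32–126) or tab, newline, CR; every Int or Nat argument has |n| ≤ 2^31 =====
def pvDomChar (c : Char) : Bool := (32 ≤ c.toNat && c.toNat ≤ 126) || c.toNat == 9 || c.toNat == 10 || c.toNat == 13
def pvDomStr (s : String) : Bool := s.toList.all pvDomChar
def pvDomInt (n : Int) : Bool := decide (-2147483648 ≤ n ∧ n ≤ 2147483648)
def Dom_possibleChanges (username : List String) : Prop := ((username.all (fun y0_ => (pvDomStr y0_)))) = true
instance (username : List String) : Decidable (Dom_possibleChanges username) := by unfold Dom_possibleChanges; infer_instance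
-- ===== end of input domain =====

-- B replaces A's adjacent-pair scan (with break) by comparing each string to its sorted character list; objective: simpler.

-- ===== PORT A =====
-- the inner 'for i in range(1, len(user)) … break' loop, walking adjacent pairs
def pvScanA : List Char → String
  | a :: b :: rest => if a > b then "YES" else pvScanA (b :: rest)
  | _ => "NO"

def possibleChanges (username : List String) : List String :=
  username.foldl (fun res user => res ++ [pvScanA user.toList]) []

-- ===== PORT B =====
def possibleChanges_alt (username : List String) : List String :=
  username.map (fun u =>
    if u.toList = PySem.List.sorted u.toList (fun x => x) false then "NO" else "YES")

-- ===== PRECONDITION & SPEC =====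
def Spec_possibleChanges (username : List String) (out : List String) : Prop := out = possibleChanges_alt username
instance (username : List String) (out : List String) : Decidable (Spec_possibleChanges username out) := by unfold Spec_possibleChanges; infer_instance

-- ===== CLAIM (what is proved, stated in full; the proofs are below) =====
def Claim_equal_possibleChanges : Prop := ∀ (username : List String), Dom_possibleChanges username → Spec_possibleChanges username (possibleChanges username)

-- ===== LEMMAS AND PROOFS =====

theorem pvScanA_chain (l : List Char) :
    pvScanA l = if List.IsChain (· ≤ ·) l then "NO" else "YES" := by
  induction l with
  | nil => simp [pvScanA]
  | cons a t ih =>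
    cases t with
    | nil => simp [pvScanA]
    | cons b r =>
      by_cases h : a > b
      · simp [pvScanA, h, List.isChain_cons_cons, not_le.mpr h]
      · have hab : a ≤ b := not_lt.mp h
        simp [pvScanA, h, List.isChain_cons_cons, hab, ih]

theorem pvScanA_sorted (l : List Char) :
    pvScanA l = if l = PySem.List.sorted l (fun x => x) false then "NO" else "YES" := by
  rw [pvScanA_chain]
  congr 1
  simp only [eq_iff_iff]
  constructor
  · intro hc
    exact (PySem.List.sorted_id_eq_of_perm_of_pairwise l l (List.Perm.refl l)
      (List.isChain_iff_pairwise.mp hc)).symm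
  · intro he
    have h2 := PySem.List.sorted_pairwise l (fun x => x)
    rw [← he] at h2
    exact List.isChain_iff_pairwise.mpr (by simpa using h2)

theorem foldl_append_map {α β : Type} (f : α → β) (xs : List α) (acc : List β) :
    xs.foldl (fun res x => res ++ [f x]) acc = acc ++ xs.map f := by
  induction xs generalizing acc with
  | nil => simp
  | cons x t ih => simp [List.foldl, ih]

-- ===== VERDICT (by name: the statement is the Claim_ definition above) =====
theorem possibleChanges_spec : Claim_equal_possibleChanges := by
  intro username _
  unfold Spec_possibleChanges possibleChanges possibleChanges_alt
  rw [foldl_append_map]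
  simp only [List.nil_append]
  congr 1
  funext u
  exact pvScanA_sorted u.toList
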